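-- pv_equiv track=rewrite | github.com/welljustpia/snm | main.py | extract_term
-- ===== SOURCE A (Python) =====
-- def extract_term(tokens, tags) :
--     b_idx = []
--     result = []
--     for i in range(len(tags)) :
--         if tags[i] == 1:
--             b_idx.append(i)
--     for i in range(len(b_idx)) :
--         start_idx = b_idx[i]
--         if i != len(b_idx)-1 :
--             end_idx = b_idx[i+1]
--             amount_of_o = tags[start_idx:end_idx].count(0)
--             result.append(tokens[start_idx:end_idx-amount_of_o])
--         else :
--             amount_of_o = tags[start_idx:].count(0)
--             result.append(tokens[start_idx:len(tokens)-amount_of_o])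
--     result = ["".join(c) for c in result]
--     return result
-- ===== SOURCE B (Python) =====
-- def extract_term(tokens, tags):
--     # single forward pass: state machine keeping the current segment start and
--     # the running count of non-zero tags since that start
--     result = []
--     start = None
--     nonzero = 0
--     for i, t in enumerate(tags):
--         if t == 1:
--             if start is not None:
--                 result.append("".join(tokens[start:start + nonzero]))
--             start = i
--             nonzero = 0
--         if t != 0:
--             nonzero += 1
--     if start is not None:
--         zeros = (len(tags) - start) - nonzero
--         result.append("".join(tokens[start:len(tokens) - zeros]))
--     return result
-- ===== Notes on version B (the rewrite author's own statement) =====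
-- stated objective: alternative
-- what changed: Replaces the two-phase version (collect all begin indices, then re-slice tags and count zeros for each consecutive pair) with a single forward pass over enumerate(tags) that keeps the current segment start and a running non-zero count, closing segments on the fly.
import Mathlib
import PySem

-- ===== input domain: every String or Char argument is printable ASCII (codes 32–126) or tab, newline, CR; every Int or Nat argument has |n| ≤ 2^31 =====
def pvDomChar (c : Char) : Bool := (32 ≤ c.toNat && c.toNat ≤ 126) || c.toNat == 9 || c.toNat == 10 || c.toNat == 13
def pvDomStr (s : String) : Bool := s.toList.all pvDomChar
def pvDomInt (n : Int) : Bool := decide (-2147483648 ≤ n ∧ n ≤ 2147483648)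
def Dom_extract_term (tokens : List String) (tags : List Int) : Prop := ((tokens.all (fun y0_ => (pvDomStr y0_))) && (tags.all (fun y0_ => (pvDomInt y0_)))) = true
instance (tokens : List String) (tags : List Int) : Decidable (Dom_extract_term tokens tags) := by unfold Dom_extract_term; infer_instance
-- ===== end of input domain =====

-- B replaces A's two-phase scan (collect begin indices, then slice+count per pair) by one
-- forward pass that closes segments on the fly; same return value, no argument is mutated.

-- ===== PORT A =====
-- body of A's second loop: the token slice appended for begin index number i
def extract_term_seg (tokens : List String) (tags : List Int) (b_idx : List Int) (i : Int) : List String :=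
  let start_idx := PySem.List.pyGetD b_idx i 0
  if i != PySem.List.len b_idx - 1 then
    let end_idx := PySem.List.pyGetD b_idx (i + 1) 0
    let amount_of_o : Int := PySem.List.count (PySem.List.slice tags (some start_idx) (some end_idx)) 0
    PySem.List.slice tokens (some start_idx) (some (end_idx - amount_of_o))
  else
    let amount_of_o : Int := PySem.List.count (PySem.List.slice tags (some start_idx)) 0
    PySem.List.slice tokens (some start_idx) (some (PySem.List.len tokens - amount_of_o))

def extract_term (tokens : List String) (tags : List Int) : List String :=
  let b_idx : List Int := (PySem.List.pyRange 0 (PySem.List.len tags) 1).foldl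
    (fun acc i => if PySem.List.pyGetD tags i 0 == 1 then acc ++ [i] else acc) []
  let result : List (List String) := (PySem.List.pyRange 0 (PySem.List.len b_idx) 1).foldl
    (fun res i => res ++ [extract_term_seg tokens tags b_idx i]) []
  result.map (fun c => PySem.Str.join "" c)

-- ===== PORT B =====
-- loop body of B's single pass: state = (result, current segment start, non-zero count)
def extract_term_step (tokens : List String) (st : List String × Option Int × Int) (it : Int × Int) :
    List String × Option Int × Int :=
  let st1 := if it.2 == 1 then
      ((match st.2.1 with
        | some s => st.1 ++ [PySem.Str.join "" (PySem.List.slice tokens (some s) (some (s + st.2.2)))]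
        | none => st.1), some it.1, (0 : Int))
    else st
  if it.2 != 0 then (st1.1, st1.2.1, st1.2.2 + 1) else st1

def extract_term_alt (tokens : List String) (tags : List Int) : List String :=
  let st := (PySem.List.enumerate tags).foldl (extract_term_step tokens) ([], none, 0)
  match st with
  | (res, some s, nz) =>
      res ++ [PySem.Str.join "" (PySem.List.slice tokens (some s)
        (some (PySem.List.len tokens - ((PySem.List.len tags - s) - nz))))]
  | (res, none, _) => res

-- ===== PRECONDITION & SPEC =====
def Spec_extract_term (tokens : List String) (tags : List Int) (out : List String) : Prop := out = extract_term_alt tokens tags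
instance (tokens : List String) (tags : List Int) (out : List String) : Decidable (Spec_extract_term tokens tags out) := by unfold Spec_extract_term; infer_instance

-- ===== CLAIM (what is proved, stated in full; the proofs are below) =====
def Claim_equal_extract_term : Prop := ∀ (tokens : List String) (tags : List Int), Dom_extract_term tokens tags → Spec_extract_term tokens tags (extract_term tokens tags)

-- ===== LEMMAS AND PROOFS =====

-- absolute positions (counted from k) of the tags equal to 1
def beginsFrom : List Int → Int → List Int
  | [], _ => []
  | t :: r, k => if t == 1 then k :: beginsFrom r (k + 1) else beginsFrom r (k + 1)

-- A's result as a recursion over the list of begin indices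
def segsA (tokens : List String) (tags : List Int) : List Int → List String
  | [] => []
  | [s] => [PySem.Str.join "" (PySem.List.slice tokens (some s)
      (some (PySem.List.len tokens - (PySem.List.count (PySem.List.slice tags (some s)) 0 : Int))))]
  | s :: e :: rest =>
      PySem.Str.join "" (PySem.List.slice tokens (some s)
        (some (e - (PySem.List.count (PySem.List.slice tags (some s) (some e)) 0 : Int))))
      :: segsA tokens tags (e :: rest)

-- B's remaining output as a recursion over the remaining tags (k = current position, s = open start, nz = non-zero count)
def segsB (tokens : List String) : List Int → Int → Int → Int → List String
  | [], k, s, nz => [PySem.Str.join "" (PySem.List.slice tokens (some s)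
      (some (PySem.List.len tokens - ((k - s) - nz))))]
  | t :: r, k, s, nz =>
      if t == 1 then
        PySem.Str.join "" (PySem.List.slice tokens (some s) (some (s + nz))) :: segsB tokens r (k + 1) k 1
      else segsB tokens r (k + 1) s (if t != 0 then nz + 1 else nz)

lemma beginsFrom_shift (r : List Int) (k : Int) :
    beginsFrom r (k + 1) = (beginsFrom r k).map (· + 1) := by
  induction r generalizing k with
  | nil => simp [beginsFrom]
  | cons t r ih => by_cases h : t == 1 <;> simp [beginsFrom, h, ih]

lemma pyGetD_cons_succ_nat (t : Int) (r : List Int) (k : Nat) (d : Int) :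
    PySem.List.pyGetD (t :: r) ((k.succ : Nat) : Int) d = PySem.List.pyGetD r (k : Int) d := by
  rw [PySem.List.pyGetD_natCast, PySem.List.pyGetD_natCast]; simp [List.getD]

lemma bidx_eq (tags : List Int) :
    (PySem.List.pyRange 0 (tags.length : Int) 1).filter
      (fun i => PySem.List.pyGetD tags i 0 == 1) = beginsFrom tags 0 := by
  induction tags with
  | nil => simp [beginsFrom]
  | cons t r ih =>
    rw [List.length_cons, PySem.List.pyRange_zero_nat (r.length + 1), List.range_succ_eq_map,
      List.map_cons, List.filter_cons, List.map_map, List.filter_map]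
    rw [PySem.List.pyRange_zero_nat r.length, List.filter_map] at ih
    simp only [Function.comp_def, pyGetD_cons_succ_nat] at *
    by_cases h : t == 1 <;>
      simp only [beginsFrom, h, if_true, Nat.cast_zero, PySem.List.pyGetD_zero_cons,
        beginsFrom_shift r 0, ← ih, List.map_map, Function.comp_def] <;> simp

lemma pyGetD_cons_add_one {α : Type} (x : α) (xs : List α) (i : Int) (d : α) (hi : 0 ≤ i) :
    PySem.List.pyGetD (x :: xs) (i + 1) d = PySem.List.pyGetD xs i d := by
  obtain ⟨k, rfl⟩ := Int.eq_ofNat_of_zero_le hi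
  rw [show ((k : Int) + 1) = ((k + 1 : Nat) : Int) by push_cast; ring,
    PySem.List.pyGetD_natCast, PySem.List.pyGetD_natCast]
  simp [List.getD]

lemma seg_shift (tokens : List String) (tags : List Int) (x : Int) (b : List Int) (i : Int) (hi : 0 ≤ i) :
    extract_term_seg tokens tags (x :: b) (i + 1) = extract_term_seg tokens tags b i := by
  unfold extract_term_seg
  rw [pyGetD_cons_add_one x b i 0 hi, pyGetD_cons_add_one x b (i + 1) 0 (by omega)]
  have hc : ((i + 1) != PySem.List.len (x :: b) - 1) = (i != PySem.List.len b - 1) := by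
    apply Bool.eq_iff_iff.mpr
    simp only [PySem.List.len_eq, List.length_cons, bne_iff_ne]
    push_cast; omega
  rw [hc]

lemma mapA_eq_segsA (tokens : List String) (tags : List Int) (b : List Int) :
    (PySem.List.pyRange 0 (b.length : Int) 1).map
      (fun i => PySem.Str.join "" (extract_term_seg tokens tags b i)) = segsA tokens tags b := by
  induction b with
  | nil => simp [segsA]
  | cons s b' ih =>
    cases b' with
    | nil =>
      have h1 : ((List.length [s] : Nat) : Int) = 0 + 1 := by simp
      rw [h1, PySem.List.pyRange_one_singleton, List.map_singleton]
      have hc : ((0 : Int) != PySem.List.len [s] - 1) = false := by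
        simp [PySem.List.len_eq]
      simp only [segsA, extract_term_seg, hc, Bool.false_eq_true, if_false,
        PySem.List.pyGetD_zero_cons]
    | cons e rest =>
      rw [List.length_cons, PySem.List.pyRange_zero_nat ((e :: rest).length + 1), List.range_succ_eq_map,
        List.map_cons, List.map_cons, List.map_map, List.map_map]
      have htail : ∀ k : Nat,
          PySem.Str.join "" (extract_term_seg tokens tags (s :: e :: rest) ((k.succ : Nat) : Int))
          = PySem.Str.join "" (extract_term_seg tokens tags (e :: rest) ((k : Nat) : Int)) := by
        intro k
        rw [show ((k.succ : Nat) : Int) = (k : Int) + 1 by push_cast; ring,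
          seg_shift tokens tags s (e :: rest) (k : Int) (by positivity)]
      simp only [Function.comp_def]
      rw [List.map_congr_left (fun k _ => htail k)]
      rw [PySem.List.pyRange_zero_nat, List.map_map] at ih
      simp only [Function.comp_def] at ih
      rw [ih]
      have hget1 : PySem.List.pyGetD (s :: e :: rest) 1 0 = e := by
        rw [show (1 : Int) = 0 + 1 by ring, pyGetD_cons_add_one s (e :: rest) 0 0 le_rfl,
          PySem.List.pyGetD_zero_cons]
      have hc : (((0 : Int)) != PySem.List.len (s :: e :: rest) - 1) = true := by
        apply Bool.eq_iff_iff.mpr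
        simp only [PySem.List.len_eq, List.length_cons, bne_iff_ne]
        constructor
        · intro _; trivial
        · intro _; push_cast; omega
      simp only [segsA, extract_term_seg, hc, if_true, Nat.cast_zero, zero_add,
        PySem.List.pyGetD_zero_cons, hget1]

lemma A_eq_segsA (tokens : List String) (tags : List Int) :
    extract_term tokens tags = segsA tokens tags (beginsFrom tags 0) := by
  unfold extract_term
  simp only [PySem.List.len_eq, PySem.List.foldl_append_if_eq_filter,
    PySem.List.foldl_append_singleton_eq_map, List.nil_append, bidx_eq, List.map_map,
    Function.comp_def]
  exact mapA_eq_segsA tokens tags (beginsFrom tags 0)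

lemma foldB_none (tokens : List String) :
    ∀ (l : List Int) (k : Int) (res : List String) (nz : Int), (∀ t ∈ l, (t == 1) = false) →
      (PySem.List.enumerate l k).foldl (extract_term_step tokens) (res, none, nz)
        = (res, none, nz + ((l.countP (fun t => t != 0) : Nat) : Int)) := by
  intro l
  induction l with
  | nil => intro k res nz _; simp [PySem.List.enumerate]
  | cons t r ih =>
    intro k res nz h
    rw [PySem.List.enumerate_cons, List.foldl_cons]
    have h1 : (t == 1) = false := h t (by simp)
    by_cases h2 : (t != 0) = true
    · rw [show extract_term_step tokens (res, none, nz) (k, t) = (res, none, nz + 1) by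
        simp [extract_term_step, h1, h2]]
      rw [ih (k + 1) res (nz + 1) (fun x hx => h x (by simp [hx]))]
      simp only [List.countP_cons, h2, if_true, Prod.mk.injEq]
      refine ⟨trivial, trivial, by push_cast; omega⟩
    · rw [show extract_term_step tokens (res, none, nz) (k, t) = (res, none, nz) by
        simp [extract_term_step, h1, h2]]
      rw [ih (k + 1) res nz (fun x hx => h x (by simp [hx]))]
      simp only [List.countP_cons, h2, Bool.false_eq_true, if_false, Prod.mk.injEq]
      exact ⟨trivial, trivial, rfl⟩

lemma foldB_some (tokens : List String) (tags : List Int) :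
    ∀ (rest : List Int) (k : Int) (res : List String) (s nz : Int),
      k + (rest.length : Int) = (tags.length : Int) →
      (match (PySem.List.enumerate rest k).foldl (extract_term_step tokens) (res, some s, nz) with
       | (res', some s', nz') =>
           res' ++ [PySem.Str.join "" (PySem.List.slice tokens (some s')
             (some (PySem.List.len tokens - ((PySem.List.len tags - s') - nz'))))]
       | (res', none, _) => res')
      = res ++ segsB tokens rest k s nz := by
  intro rest
  induction rest with
  | nil =>
    intro k res s nz hk
    simp only [List.length_nil, Nat.cast_zero, add_zero] at hk
    simp [PySem.List.enumerate, segsB, PySem.List.len_eq, hk]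
  | cons t r ih =>
    intro k res s nz hk
    rw [PySem.List.enumerate_cons, List.foldl_cons]
    have hk' : (k + 1) + (r.length : Int) = (tags.length : Int) := by
      simp only [List.length_cons] at hk; push_cast at hk ⊢; omega
    by_cases h1 : (t == 1) = true
    · have ht : t = 1 := by exact eq_of_beq h1
      rw [show extract_term_step tokens (res, some s, nz) (k, t)
          = (res ++ [PySem.Str.join "" (PySem.List.slice tokens (some s) (some (s + nz)))], some k, 1) by
        subst ht; simp [extract_term_step]]
      rw [ih (k + 1) _ k 1 hk']
      simp only [segsB, h1, if_true, List.append_assoc, List.singleton_append]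
    · by_cases h2 : (t != 0) = true
      · rw [show extract_term_step tokens (res, some s, nz) (k, t) = (res, some s, nz + 1) by
          simp [extract_term_step, h1, h2]]
        rw [ih (k + 1) res s (nz + 1) hk']
        simp only [segsB, h1, h2, Bool.false_eq_true, if_false, if_true]
      · rw [show extract_term_step tokens (res, some s, nz) (k, t) = (res, some s, nz) by
          simp [extract_term_step, h1, h2]]
        rw [ih (k + 1) res s nz hk']
        simp only [segsB, h1, h2, Bool.false_eq_true, if_false]

lemma count_split (l : List Int) :
    ((PySem.List.count l 0 : Nat) : Int) + ((l.countP (fun t => t != 0) : Nat) : Int) = (l.length : Int) := by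
  rw [PySem.List.count_eq]
  induction l with
  | nil => simp
  | cons t r ih =>
    by_cases h : t = 0 <;>
      simp only [List.count_cons, List.countP_cons, h] <;> push_cast at ih ⊢ <;> simp [h] <;> omega

lemma slice_pre {α : Type} (pre rest : List α) (s : Int) (hs : 0 ≤ s) (hle : s.toNat ≤ pre.length) :
    PySem.List.slice (pre ++ rest) (some s) (some ((pre.length : Nat) : Int)) = pre.drop s.toNat := by
  rw [PySem.List.slice_toNat _ hs (by positivity), Int.toNat_natCast,
    List.drop_append_of_le_length hle]
  exact List.take_left' (by simp [List.length_drop])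

lemma drop_len_int (pre : List Int) (s : Int) (hs : 0 ≤ s) (hle : s.toNat ≤ pre.length) :
    ((pre.drop s.toNat).length : Int) = (pre.length : Int) - s := by
  rw [List.length_drop]
  have := Int.toNat_of_nonneg hs
  omega

lemma segsB_eq_segsA (tokens : List String) :
    ∀ (rest pre : List Int) (s : Int), 0 ≤ s → s.toNat ≤ pre.length →
      segsB tokens rest ((pre.length : Nat) : Int) s (((pre.drop s.toNat).countP (fun t => t != 0) : Nat) : Int)
        = segsA tokens (pre ++ rest) (s :: beginsFrom rest ((pre.length : Nat) : Int)) := by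
  intro rest
  induction rest with
  | nil =>
    intro pre s hs hle
    simp only [segsB, List.append_nil, beginsFrom, segsA]
    rw [PySem.List.slice_from _ hs]
    have h1 := count_split (pre.drop s.toNat)
    have h2 := drop_len_int pre s hs hle
    congr 4
    omega
  | cons t r ih =>
    intro pre s hs hle
    by_cases h1 : (t == 1) = true
    · have ht : t = 1 := eq_of_beq h1
      simp only [segsB, beginsFrom, h1, if_true, segsA]
      have hk0 : (0 : Int) ≤ ((pre.length : Nat) : Int) := by positivity
      have ihx := ih (pre ++ [t]) ((pre.length : Nat) : Int) hk0
        (by simp [Int.toNat_natCast])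
      rw [Int.toNat_natCast, List.drop_left' rfl] at ihx
      have hlen1 : (((pre ++ [t]).length : Nat) : Int) = ((pre.length : Nat) : Int) + 1 := by
        simp
      rw [hlen1] at ihx
      have hcnt1 : (([t].countP (fun t => t != 0) : Nat) : Int) = 1 := by subst ht; simp
      rw [hcnt1] at ihx
      rw [List.append_assoc, List.singleton_append] at ihx
      rw [ihx]
      have hsl := slice_pre pre (t :: r) s hs hle
      rw [hsl]
      have h1c := count_split (pre.drop s.toNat)
      have h2c := drop_len_int pre s hs hle
      congr 4
      omega
    · simp only [segsB, beginsFrom, h1, Bool.false_eq_true, if_false]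
      have ihx := ih (pre ++ [t]) s hs (by simp; omega)
      rw [List.drop_append_of_le_length hle, List.countP_append] at ihx
      have hlen1 : (((pre ++ [t]).length : Nat) : Int) = ((pre.length : Nat) : Int) + 1 := by
        simp
      rw [hlen1, List.append_assoc, List.singleton_append] at ihx
      have hnz : (if (t != 0) = true then
            (((pre.drop s.toNat).countP (fun t => t != 0) : Nat) : Int) + 1
          else (((pre.drop s.toNat).countP (fun t => t != 0) : Nat) : Int))
          = ((((pre.drop s.toNat).countP (fun t => t != 0) + [t].countP (fun t => t != 0)) : Nat) : Int) := by
        by_cases h2 : (t != 0) = true <;> simp [h2]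
      rw [hnz]
      exact ihx

lemma first_one (tags : List Int) :
    (∀ t ∈ tags, (t == 1) = false) ∨
      ∃ pre r, tags = pre ++ 1 :: r ∧ ∀ t ∈ pre, (t == 1) = false := by
  induction tags with
  | nil => left; intro t ht; cases ht
  | cons t r ih =>
    by_cases h : (t == 1) = true
    · right
      exact ⟨[], r, by rw [eq_of_beq h]; rfl, by intro x hx; cases hx⟩
    · rcases ih with hall | ⟨pre, r', heq, hpre⟩
      · left
        intro x hx
        rcases List.mem_cons.mp hx with rfl | hx'
        · exact Bool.eq_false_iff.mpr (fun hc => h hc)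
        · exact hall x hx'
      · right
        refine ⟨t :: pre, r', by rw [heq]; rfl, ?_⟩
        intro x hx
        rcases List.mem_cons.mp hx with rfl | hx'
        · exact Bool.eq_false_iff.mpr (fun hc => h hc)
        · exact hpre x hx'

lemma beginsFrom_nil_of (l : List Int) (k : Int) (h : ∀ t ∈ l, (t == 1) = false) :
    beginsFrom l k = [] := by
  induction l generalizing k with
  | nil => rfl
  | cons t r ih =>
    simp only [beginsFrom, h t (by simp), Bool.false_eq_true, if_false]
    exact ih (k + 1) (fun x hx => h x (by simp [hx]))

lemma beginsFrom_append_one (pre r : List Int) (k : Int) (h : ∀ t ∈ pre, (t == 1) = false) :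
    beginsFrom (pre ++ 1 :: r) k = (k + (pre.length : Int)) :: beginsFrom r (k + (pre.length : Int) + 1) := by
  induction pre generalizing k with
  | nil => simp [beginsFrom]
  | cons t p ih =>
    rw [List.cons_append]
    simp only [beginsFrom, h t (by simp), Bool.false_eq_true, if_false]
    rw [ih (k + 1) (fun x hx => h x (by simp [hx]))]
    have h1 : k + 1 + (p.length : Int) = k + ((t :: p).length : Int) := by
      simp only [List.length_cons]; push_cast; ring
    rw [h1]

-- ===== VERDICT (by name: the statement is the Claim_ definition above) =====
theorem extract_term_spec : Claim_equal_extract_term := by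
  intro tokens tags _
  unfold Spec_extract_term
  rw [A_eq_segsA]
  rcases first_one tags with hall | ⟨pre, r, heq, hpre⟩
  · rw [beginsFrom_nil_of tags 0 hall]
    unfold extract_term_alt
    rw [foldB_none tokens tags 0 [] 0 hall]
    rfl
  · subst heq
    rw [beginsFrom_append_one pre r 0 hpre, zero_add]
    unfold extract_term_alt
    rw [PySem.List.enumerate_append, List.foldl_append, zero_add,
      foldB_none tokens pre 0 [] 0 hpre,
      PySem.List.enumerate_cons, List.foldl_cons]
    rw [show extract_term_step tokens
        ([], none, 0 + ((pre.countP (fun t => t != 0) : Nat) : Int)) (((pre.length : Nat) : Int), 1)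
        = ([], some ((pre.length : Nat) : Int), 1) by simp [extract_term_step]]
    have hlen : (((pre.length : Nat) : Int) + 1) + (r.length : Int) = ((pre ++ 1 :: r).length : Int) := by
      simp [List.length_append]; ring
    rw [foldB_some tokens (pre ++ 1 :: r) r (((pre.length : Nat) : Int) + 1) []
      ((pre.length : Nat) : Int) 1 hlen, List.nil_append]
    have hseg := segsB_eq_segsA tokens r (pre ++ [1]) ((pre.length : Nat) : Int)
      (by positivity) (by simp [Int.toNat_natCast])
    rw [Int.toNat_natCast, List.drop_left' rfl] at hseg
    have hlen1 : (((pre ++ [1]).length : Nat) : Int) = ((pre.length : Nat) : Int) + 1 := by simp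
    rw [hlen1] at hseg
    have hcnt1 : (([(1 : Int)].countP (fun t => t != 0) : Nat) : Int) = 1 := by simp
    rw [hcnt1, List.append_assoc, List.singleton_append] at hseg
    rw [← hseg]
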